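-- pv_equiv track=rewrite | github.com/sam-pennington/AdventOfCode2024 | python/days/9/solve-2.py | large_enough_free_space
-- ===== SOURCE A (Python) =====
-- from typing import Union
--
-- def large_enough_free_space(representation: list[Union[int, None]], file_idx: int, file_size: int) -> Union[int, None]:
--     max_idx: int = len(representation)
--     for idx, val in enumerate(representation):
--
--         if val is None:
--             sufficient = True
--             for forward in range(file_size):
--                 if representation[idx + forward] is not None:
--                     sufficient = False
--             if sufficient: return idx
--
--         if idx + 1 >= file_idx or (idx + file_size >= max_idx):
--             break
--
--     return None
-- ===== SOURCE B (Python) =====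
-- def large_enough_free_space(representation, file_idx, file_size):
--     n = len(representation)
--     if n == 0:
--         return None
--     # last index the scan may report: bounded by file_idx and by the room left
--     m = min(max(min(file_idx - 1, n - file_size), 0), n - 1)
--     need = max(file_size, 1)
--     streak = 0
--     for i, val in enumerate(representation):
--         if val is None:
--             streak += 1
--             if streak >= need:
--                 start = i - need + 1
--                 return start if start <= m else None
--         else:
--             streak = 0
--     return None
-- ===== Notes on version B (the rewrite author's own statement) =====
-- stated objective: faster
-- what changed: Replaces A's rescan of the next file_size cells at every None (plus per-index break test) with a single left-to-right pass that keeps a consecutive-None streak and returns the window start the first time the streak reaches the needed size, gated by the last index A may report.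
import Mathlib
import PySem

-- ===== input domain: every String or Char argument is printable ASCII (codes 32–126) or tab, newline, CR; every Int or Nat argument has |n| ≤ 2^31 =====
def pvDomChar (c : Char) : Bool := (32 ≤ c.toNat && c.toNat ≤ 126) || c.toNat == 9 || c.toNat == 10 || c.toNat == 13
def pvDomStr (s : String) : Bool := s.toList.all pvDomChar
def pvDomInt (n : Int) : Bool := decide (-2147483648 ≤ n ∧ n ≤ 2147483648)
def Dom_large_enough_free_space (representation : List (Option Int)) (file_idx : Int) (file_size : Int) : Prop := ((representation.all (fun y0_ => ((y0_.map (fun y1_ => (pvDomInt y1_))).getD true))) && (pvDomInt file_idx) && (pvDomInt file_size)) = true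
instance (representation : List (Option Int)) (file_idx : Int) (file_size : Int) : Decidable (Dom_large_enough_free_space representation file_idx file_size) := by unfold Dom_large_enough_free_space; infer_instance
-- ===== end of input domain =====

-- B replaces A's rescan of the next file_size cells at every None with a single pass
-- keeping a consecutive-None streak; equivalence of return values is proved on Pre_
-- (the inputs where Python A does not raise IndexError).

-- ===== PORT A =====
-- inner loop 'for forward in range(file_size)': an out-of-range read is Python's
-- IndexError; the port treats such a read as leaving `sufficient` unchanged, and
-- Pre_large_enough_free_space excludes exactly the inputs where that read happens.
def pvASuff (full : List (Option Int)) (idx : Nat) (file_size : Int) : Bool :=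
  (PySem.List.pyRange 0 file_size 1).foldl
    (fun suf f =>
      match PySem.List.pyGet? full ((idx : Int) + f) with
      | some (some _) => false
      | _ => suf) true

def pvALoop (full : List (Option Int)) (file_idx file_size max_idx : Int) (idx : Nat) : Option Int :=
  if h : idx < full.length then
    if full[idx] = none ∧ pvASuff full idx file_size = true then some (idx : Int)
    else if ((idx : Int) + 1 ≥ file_idx) ∨ ((idx : Int) + file_size ≥ max_idx) then none
    else pvALoop full file_idx file_size max_idx (idx + 1)
  else none
termination_by full.length - idx

def large_enough_free_space (representation : List (Option Int)) (file_idx : Int) (file_size : Int) : Option Int :=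
  pvALoop representation file_idx file_size (representation.length : Int) 0

-- ===== PORT B =====
def pvBLoop (m need : Int) (i streak : Int) : List (Option Int) → Option Int
  | [] => none
  | v :: rest =>
    if v = none then
      if streak + 1 ≥ need then
        if i - need + 1 ≤ m then some (i - need + 1) else none
      else pvBLoop m need (i + 1) (streak + 1) rest
    else pvBLoop m need (i + 1) 0 rest

def large_enough_free_space_alt (representation : List (Option Int)) (file_idx : Int) (file_size : Int) : Option Int :=
  let n : Int := representation.length
  if n = 0 then none
  else
    let m : Int := min (max (min (file_idx - 1) (n - file_size)) 0) (n - 1)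
    let need : Int := max file_size 1
    pvBLoop m need 0 0 representation

-- ===== PRECONDITION & SPEC =====
-- Pre_ excludes exactly the inputs on which the Python A raises IndexError:
-- a None in the first cell while file_size exceeds the list length.
def Pre_large_enough_free_space (representation : List (Option Int)) (file_idx : Int) (file_size : Int) : Prop :=
  representation = [] ∨ file_size ≤ (representation.length : Int) ∨ representation.getD 0 none ≠ none
instance (representation : List (Option Int)) (file_idx : Int) (file_size : Int) : Decidable (Pre_large_enough_free_space representation file_idx file_size) := by unfold Pre_large_enough_free_space; infer_instance

def pvWitness_large_enough_free_space : List (Option Int) × Int × Int := ([some 1, none, none], 2, 2)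

def Spec_large_enough_free_space (representation : List (Option Int)) (file_idx : Int) (file_size : Int) (out : Option Int) : Prop := out = large_enough_free_space_alt representation file_idx file_size
instance (representation : List (Option Int)) (file_idx : Int) (file_size : Int) (out : Option Int) : Decidable (Spec_large_enough_free_space representation file_idx file_size out) := by unfold Spec_large_enough_free_space; infer_instance

-- ===== CLAIM (what is proved, stated in full; the proofs are below) =====
def Claim_equal_large_enough_free_space : Prop := ∀ (representation : List (Option Int)) (file_idx : Int) (file_size : Int), Dom_large_enough_free_space representation file_idx file_size → Pre_large_enough_free_space representation file_idx file_size → Spec_large_enough_free_space representation file_idx file_size (large_enough_free_space representation file_idx file_size)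


-- ===== LEMMAS AND PROOFS =====

-- K: A's break bound; M: the last index A's outer loop processes (when the list is nonempty)
def pvK (rep : List (Option Int)) (fi fs : Int) : Int := min (fi - 1) ((rep.length : Int) - fs)
def pvM (rep : List (Option Int)) (fi fs : Int) : Nat := (min (max (pvK rep fi fs) 0) ((rep.length : Int) - 1)).toNat

-- A's acceptance condition at index s (out-of-range reads as free)
def pvWinb (rep : List (Option Int)) (fs : Int) (s : Nat) : Bool :=
  decide (∀ j < (max fs 1).toNat, rep.getD (s + j) none = none)
-- a genuine full window of (max fs 1) Nones inside the list
def pvWf (rep : List (Option Int)) (fs : Int) (s : Nat) : Bool :=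
  decide (s + (max fs 1).toNat ≤ rep.length ∧ ∀ j < (max fs 1).toNat, rep.getD (s + j) none = none)

theorem find?_range'_some_iff (p : Nat → Bool) (a len x : Nat) :
    (List.range' a len).find? p = some x ↔
      (a ≤ x ∧ x < a + len ∧ p x = true ∧ ∀ y, a ≤ y → y < x → p y = false) := by
  induction len generalizing a with
  | zero => simp; omega
  | succ k ih =>
    rw [List.range'_succ, List.find?_cons]
    by_cases hpa : p a = true
    · simp only [hpa]
      constructor
      · rintro h; cases h
        exact ⟨le_refl _, by omega, hpa, fun y h1 h2 => by omega⟩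
      · rintro ⟨h1, h2, h3, h4⟩
        have : x = a := by
          by_contra hne
          have := h4 a (le_refl _) (by omega)
          rw [hpa] at this; exact absurd this (by simp)
        simp [this]
    · simp only [Bool.not_eq_true] at hpa
      rw [hpa]; simp only [ih]
      constructor
      · rintro ⟨h1, h2, h3, h4⟩
        refine ⟨by omega, by omega, h3, fun y hy1 hy2 => ?_⟩
        rcases Nat.eq_or_lt_of_le hy1 with rfl | h
        · exact hpa
        · exact h4 y h hy2
      · rintro ⟨h1, h2, h3, h4⟩
        have hax : a ≠ x := by rintro rfl; rw [hpa] at h3; exact absurd h3 (by simp)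
        exact ⟨by omega, by omega, h3, fun y hy1 hy2 => h4 y (by omega) hy2⟩

theorem find?_range'_none_iff (p : Nat → Bool) (a len : Nat) :
    (List.range' a len).find? p = none ↔ ∀ y, a ≤ y → y < a + len → p y = false := by
  rw [List.find?_eq_none]
  constructor
  · intro h y h1 h2
    have := h y (by simp only [List.mem_range'_1]; omega)
    simpa using this
  · intro h y hy
    simp only [List.mem_range'_1] at hy
    simpa using h y hy.1 (by omega)

theorem foldl_suff_step (rep : List (Option Int)) (idx : Nat) (l : List Int) (b : Bool) :
    l.foldl (fun suf f =>
      match PySem.List.pyGet? rep ((idx : Int) + f) with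
      | some (some _) => false
      | _ => suf) b
    = (b && l.all (fun f =>
      match PySem.List.pyGet? rep ((idx : Int) + f) with
      | some (some _) => false
      | _ => true)) := by
  induction l generalizing b with
  | nil => simp
  | cons x xs ih =>
    simp only [List.foldl_cons, List.all_cons, ih]
    rcases h : PySem.List.pyGet? rep ((idx : Int) + x) with _ | c
    · simp
    · rcases c with _ | v
      · simp
      · simp

theorem good_iff (rep : List (Option Int)) (t : Int) (ht : 0 ≤ t) :
    (match PySem.List.pyGet? rep t with
      | some (some _) => false
      | _ => true) = true ↔ rep.getD t.toNat none = none := by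
  rcases h : PySem.List.pyGet? rep t with _ | c
  · rw [PySem.List.pyGet?_eq_none_iff rep t] at h
    have : rep.length ≤ t.toNat := by
      unfold PySem.Raise.InRange at h; omega
    simp [List.getD_eq_getElem?_getD, List.getElem?_eq_none this]
  · have h2 : rep[t.toNat]? = some c := by rw [PySem.List.pyGet?_of_nonneg rep ht] at h; exact h
    have hg : rep.getD t.toNat none = c := by rw [List.getD_eq_getElem?_getD, h2]; rfl
    rw [hg]
    cases c with
    | none => simp
    | some v => simp

theorem pvASuff_iff (rep : List (Option Int)) (idx : Nat) (fs : Int) :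
    pvASuff rep idx fs = true ↔ ∀ j < fs.toNat, rep.getD (idx + j) none = none := by
  unfold pvASuff
  rw [foldl_suff_step, Bool.true_and, List.all_eq_true]
  constructor
  · intro h j hj
    have hm : ((j : Int)) ∈ PySem.List.pyRange 0 fs 1 := by
      rw [PySem.List.mem_pyRange_one]; omega
    have := (good_iff rep ((idx : Int) + j) (by omega)).mp (h _ hm)
    have ht : ((idx : Int) + j).toNat = idx + j := by omega
    rwa [ht] at this
  · intro h f hf
    rw [PySem.List.mem_pyRange_one] at hf
    rw [good_iff rep _ (by omega)]
    have ht : ((idx : Int) + f).toNat = idx + f.toNat := by omega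
    rw [ht]
    exact h f.toNat (by omega)

theorem cond_iff (rep : List (Option Int)) (idx : Nat) (fs : Int) (h : idx < rep.length) :
    (rep[idx] = none ∧ pvASuff rep idx fs = true) ↔ pvWinb rep fs idx = true := by
  have hD : rep.getD idx none = rep[idx] := List.getD_eq_getElem rep none h
  unfold pvWinb
  rw [decide_eq_true_iff, pvASuff_iff]
  rcases le_or_gt fs 0 with hfs | hfs
  · have h1 : (max fs 1).toNat = 1 := by omega
    have h0 : fs.toNat = 0 := by omega
    rw [h1, h0]
    constructor
    · rintro ⟨hv, _⟩ j hj
      interval_cases j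
      · rw [Nat.add_zero, hD]; exact hv
    · intro hw
      refine ⟨?_, fun j hj => by omega⟩
      have := hw 0 (by omega)
      rwa [Nat.add_zero, hD] at this
  · have h1 : (max fs 1).toNat = fs.toNat := by omega
    rw [h1]
    constructor
    · rintro ⟨hv, hs⟩ j hj; exact hs j hj
    · intro hw
      refine ⟨?_, hw⟩
      have := hw 0 (by omega)
      rwa [Nat.add_zero, hD] at this

theorem aLoop_char (rep : List (Option Int)) (fi fs : Int) (hn : 0 < rep.length) :
    ∀ (fuel idx : Nat), pvM rep fi fs - idx = fuel → idx ≤ pvM rep fi fs →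
      pvALoop rep fi fs (rep.length : Int) idx =
        ((List.range' idx (pvM rep fi fs + 1 - idx)).find? (pvWinb rep fs)).map (fun s => (s : Int)) := by
  have hM : (pvM rep fi fs : Int) = min (max (pvK rep fi fs) 0) ((rep.length : Int) - 1) := by
    unfold pvM
    rw [Int.toNat_of_nonneg]
    exact le_min (le_max_right _ 0) (by omega)
  have hMlt : pvM rep fi fs < rep.length := by
    have := min_le_right (max (pvK rep fi fs) 0) ((rep.length : Int) - 1)
    omega
  have hKfi : pvK rep fi fs ≤ fi - 1 := min_le_left _ _
  have hKn : pvK rep fi fs ≤ (rep.length : Int) - fs := min_le_right _ _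
  intro fuel
  induction fuel with
  | zero =>
    intro idx h0 hle
    have hidx : idx = pvM rep fi fs := by omega
    subst hidx
    rw [pvALoop, dif_pos hMlt]
    have hrest : pvM rep fi fs + 1 - pvM rep fi fs = 0 + 1 := by omega
    rw [hrest, List.range'_succ, List.find?_cons]
    by_cases hw : pvWinb rep fs (pvM rep fi fs) = true
    · rw [if_pos ((cond_iff rep _ fs hMlt).mpr hw), hw]
      simp
    · rw [if_neg (by rw [cond_iff rep _ fs hMlt]; simpa using hw)]
      rw [Bool.not_eq_true] at hw
      rw [hw]
      simp only [List.range'_zero, List.find?_nil]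
      by_cases hc : ((pvM rep fi fs : Int) + 1 ≥ fi) ∨ ((pvM rep fi fs : Int) + fs ≥ (rep.length : Int))
      · rw [if_pos hc]; simp
      · rw [if_neg hc]
        push_neg at hc
        have hMK : (pvM rep fi fs : Int) < pvK rep fi fs := by
          have : pvK rep fi fs = min (fi - 1) ((rep.length : Int) - fs) := rfl
          omega
        have hMn : (pvM rep fi fs : Int) = (rep.length : Int) - 1 := by
          rcases min_choice (max (pvK rep fi fs) 0) ((rep.length : Int) - 1) with h | h
          · have := le_max_left (pvK rep fi fs) 0
            omega
          · omega
        rw [pvALoop, dif_neg (by omega)]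
        simp
  | succ k ih =>
    intro idx h0 hle
    have hidx : idx < pvM rep fi fs := by omega
    have hidxn : idx < rep.length := by omega
    rw [pvALoop, dif_pos hidxn]
    have hrest : pvM rep fi fs + 1 - idx = (pvM rep fi fs - idx) + 1 := by omega
    rw [hrest, List.range'_succ, List.find?_cons]
    by_cases hw : pvWinb rep fs idx = true
    · rw [if_pos ((cond_iff rep _ fs hidxn).mpr hw), hw]
      simp
    · rw [if_neg (by rw [cond_iff rep _ fs hidxn]; simpa using hw)]
      rw [Bool.not_eq_true] at hw
      rw [hw]
      have hiK : (idx : Int) < pvK rep fi fs := by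
        have h1 : (idx : Int) < min (max (pvK rep fi fs) 0) ((rep.length : Int) - 1) := by omega
        have h2 := min_le_left (max (pvK rep fi fs) 0) ((rep.length : Int) - 1)
        rcases max_choice (pvK rep fi fs) 0 with h | h <;> omega
      rw [if_neg (by push_neg; omega)]
      have := ih (idx + 1) (by omega) (by omega)
      rw [this]
      have : pvM rep fi fs + 1 - (idx + 1) = pvM rep fi fs - idx := by omega
      rw [this]

theorem pvWf_iff (rep : List (Option Int)) (fs : Int) (s : Nat) :
    pvWf rep fs s = true ↔
      (s + (max fs 1).toNat ≤ rep.length ∧ ∀ j < (max fs 1).toNat, rep.getD (s + j) none = none) := by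
  unfold pvWf; rw [decide_eq_true_iff]

theorem bLoop_char (rep : List (Option Int)) (fs m : Int) :
    ∀ (suf pre : List (Option Int)) (streak : Nat),
      rep = pre ++ suf → streak ≤ pre.length → streak < (max fs 1).toNat →
      (∀ j, pre.length - streak ≤ j → j < pre.length → rep.getD j none = none) →
      (streak = pre.length ∨ rep.getD (pre.length - streak - 1) none ≠ none) →
      (∀ s, s + (max fs 1).toNat ≤ pre.length → pvWf rep fs s = false) →
      pvBLoop m (max fs 1) (pre.length : Int) (streak : Int) suf =
        ((List.range rep.length).find? (pvWf rep fs)).bind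
          (fun s => if (s : Int) ≤ m then some (s : Int) else none) := by
  have hdc : (((max fs 1).toNat : Int)) = max fs 1 := Int.toNat_of_nonneg (by omega)
  have hd1 : 1 ≤ (max fs 1).toNat := by omega
  intro suf
  induction suf with
  | nil =>
    intro pre streak hrep hsl hsd hI1 hI3 hI2
    have hpre : rep = pre := by simpa using hrep
    rw [pvBLoop]
    have hfind : (List.range rep.length).find? (pvWf rep fs) = none := by
      rw [List.find?_eq_none]
      intro s hs
      simp only [Bool.not_eq_true]
      by_contra hgt
      have hw : pvWf rep fs s = true := by simpa using hgt
      have h1 := ((pvWf_iff rep fs s).mp hw).1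
      rw [hI2 s (by rw [hpre] at h1; exact h1)] at hw
      exact Bool.noConfusion hw
    rw [hfind]
    rfl
  | cons v rest ih =>
    intro pre streak hrep hsl hsd hI1 hI3 hI2
    have hlen : rep.length = pre.length + 1 + rest.length := by
      rw [hrep]; simp; omega
    have hv : rep.getD pre.length none = v := by
      rw [hrep, List.getD_eq_getElem?_getD, List.getElem?_append_right (le_refl pre.length)]
      simp
    rw [pvBLoop]
    by_cases hvn : v = none
    · rw [if_pos hvn]
      by_cases hbig : (max fs 1).toNat ≤ streak + 1
      · have hd : streak + 1 = (max fs 1).toNat := by omega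
        rw [if_pos (by omega)]
        have hs0 : ((pre.length + 1 - (max fs 1).toNat : Nat) : Int)
            = (pre.length : Int) - (max fs 1) + 1 := by omega
        have hfind : (List.range rep.length).find? (pvWf rep fs)
            = some (pre.length + 1 - (max fs 1).toNat) := by
          rw [List.range_eq_range', find?_range'_some_iff]
          refine ⟨by omega, by omega, ?_, ?_⟩
          · rw [pvWf_iff]
            refine ⟨by omega, fun j hj => ?_⟩
            rcases Nat.lt_or_ge (pre.length + 1 - (max fs 1).toNat + j) pre.length with hlt | hge
            · exact hI1 _ (by omega) hlt
            · have he : pre.length + 1 - (max fs 1).toNat + j = pre.length := by omega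
              rw [he, hv, hvn]
          · intro y hy0 hy
            exact hI2 y (by omega)
        rw [hfind]
        simp only [Option.bind_some]
        rw [← hs0]
      · rw [if_neg (by omega)]
        have h := ih (pre ++ [none]) (streak + 1)
          (by rw [hrep, hvn]; simp)
          (by simp; omega)
          (by omega)
          (by
            intro j hj1 hj2
            simp only [List.length_append, List.length_cons, List.length_nil] at hj1 hj2
            rcases Nat.lt_or_ge j pre.length with hlt | hge
            · exact hI1 j (by omega) hlt
            · have he : j = pre.length := by omega
              rw [he, hv, hvn])
          (by
            simp only [List.length_append, List.length_cons, List.length_nil]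
            rcases hI3 with h3 | h3
            · left; omega
            · right
              have he : pre.length + 1 - (streak + 1) - 1 = pre.length - streak - 1 := by omega
              rw [he]; exact h3)
          (by
            intro s hs
            simp only [List.length_append, List.length_cons, List.length_nil] at hs
            rcases Nat.lt_or_ge (s + (max fs 1).toNat) (pre.length + 1) with hlt | hge
            · exact hI2 s (by omega)
            · have hse : s + (max fs 1).toNat = pre.length + 1 := by omega
              by_contra hgt
              have hw := (pvWf_iff rep fs s).mp (by simpa using hgt)
              have hstreak : streak < pre.length := by omega
              rcases hI3 with h3 | h3
              · omega
              · apply h3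
                have he : pre.length - streak - 1 = s + (pre.length - streak - 1 - s) := by omega
                rw [he]
                exact hw.2 _ (by omega))
        have hc1 : (((pre ++ [none]).length : Nat) : Int) = (pre.length : Int) + 1 := by
          simp
        have hc2 : (((streak + 1 : Nat)) : Int) = (streak : Int) + 1 := by push_cast; ring
        rw [hc1, hc2] at h
        exact h
    · rw [if_neg hvn]
      have h := ih (pre ++ [v]) 0
        (by rw [hrep]; simp)
        (by simp)
        (by omega)
        (by intro j hj1 hj2; simp at hj1 hj2; omega)
        (by
          right
          simp only [List.length_append, List.length_cons, List.length_nil]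
          have he : pre.length + 1 - 0 - 1 = pre.length := by omega
          rw [he, hv]
          exact hvn)
        (by
          intro s hs
          simp only [List.length_append, List.length_cons, List.length_nil] at hs
          rcases Nat.lt_or_ge (s + (max fs 1).toNat) (pre.length + 1) with hlt | hge
          · exact hI2 s (by omega)
          · have hse : s + (max fs 1).toNat = pre.length + 1 := by omega
            by_contra hgt
            have hw := (pvWf_iff rep fs s).mp (by simpa using hgt)
            apply hvn
            have he : pre.length = s + ((max fs 1).toNat - 1) := by omega
            rw [← hv, he]
            exact hw.2 _ (by omega))
      have hc1 : (((pre ++ [v]).length : Nat) : Int) = (pre.length : Int) + 1 := by simp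
      have hc2 : (((0 : Nat)) : Int) = (0 : Int) := by simp
      rw [hc1, hc2] at h
      exact h

theorem pvWinb_iff (rep : List (Option Int)) (fs : Int) (s : Nat) :
    pvWinb rep fs s = true ↔ ∀ j < (max fs 1).toNat, rep.getD (s + j) none = none := by
  unfold pvWinb; rw [decide_eq_true_iff]

theorem hM_eq (rep : List (Option Int)) (fi fs : Int) (hn : 0 < rep.length) :
    (pvM rep fi fs : Int) = min (max (pvK rep fi fs) 0) ((rep.length : Int) - 1) := by
  unfold pvM
  rw [Int.toNat_of_nonneg]
  exact le_min (le_max_right _ 0) (by omega)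

theorem winb_imp_wf (rep : List (Option Int)) (fi fs : Int)
    (hPre : Pre_large_enough_free_space rep fi fs) (hn : 0 < rep.length)
    (y : Nat) (hy : y ≤ pvM rep fi fs) (h : pvWinb rep fs y = true) :
    pvWf rep fs y = true := by
  have hM := hM_eq rep fi fs hn
  have hMlt : pvM rep fi fs < rep.length := by
    have := min_le_right (max (pvK rep fi fs) 0) ((rep.length : Int) - 1)
    omega
  rw [pvWinb_iff] at h
  rw [pvWf_iff]
  refine ⟨?_, h⟩
  by_contra hgt
  have hgt' : rep.length < y + (max fs 1).toNat := by omega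
  rcases le_or_gt fs 1 with hfs | hfs
  · have : (max fs 1).toNat = 1 := by omega
    omega
  · have hdfs : (((max fs 1).toNat : Int)) = fs := by omega
    rcases le_or_gt 0 (pvK rep fi fs) with hK | hK
    · have h1 : pvK rep fi fs ≤ (rep.length : Int) - fs := min_le_right _ _
      have h2 : (pvM rep fi fs : Int) ≤ max (pvK rep fi fs) 0 :=
        hM ▸ min_le_left _ _
      have h3 : max (pvK rep fi fs) 0 = pvK rep fi fs := max_eq_left hK
      omega
    · have h3 : max (pvK rep fi fs) 0 = 0 := max_eq_right (by omega)
      have hy0 : y = 0 := by omega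
      rcases hPre with hp | hp | hp
      · rw [hp] at hn; simp at hn
      · omega
      · apply hp
        have := h 0 (by omega)
        rw [hy0] at this
        simpa using this

-- ===== VERDICT (by name: the statement is the Claim_ definition above) =====
theorem large_enough_free_space_spec : Claim_equal_large_enough_free_space := by
  intro rep fi fs hDom hPre
  unfold Spec_large_enough_free_space large_enough_free_space large_enough_free_space_alt
  by_cases hn : rep.length = 0
  · rw [pvALoop, dif_neg (by omega)]
    simp [hn]
  · have hn' : 0 < rep.length := Nat.pos_of_ne_zero hn
    have hM := hM_eq rep fi fs hn'
    have hMlt : pvM rep fi fs < rep.length := by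
      have := min_le_right (max (pvK rep fi fs) 0) ((rep.length : Int) - 1)
      omega
    have hA := aLoop_char rep fi fs hn' (pvM rep fi fs) 0 (by omega) (by omega)
    have hB := bLoop_char rep fs
      (min (max (min (fi - 1) ((rep.length : Int) - fs)) 0) ((rep.length : Int) - 1))
      rep [] 0 rfl (by simp) (by omega)
      (by intro j h1 h2; simp at h2)
      (Or.inl rfl)
      (by intro s hs; simp at hs)
    have hKdef : pvK rep fi fs = min (fi - 1) ((rep.length : Int) - fs) := rfl
    simp only [if_neg (show ¬ ((rep.length : Int) = 0) by omega)]
    simp only [List.length_nil, Nat.cast_zero] at hB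
    rw [hB, hA]
    rw [Nat.sub_zero] at hA ⊢
    rcases heq : (List.range rep.length).find? (pvWf rep fs) with _ | s0
    · simp only [Option.bind_none]
      have hnone : (List.range' 0 (pvM rep fi fs + 1)).find? (pvWinb rep fs) = none := by
        rw [find?_range'_none_iff]
        intro y hy0 hy1
        by_contra hb
        have hw : pvWinb rep fs y = true := by simpa using hb
        have := winb_imp_wf rep fi fs hPre hn' y (by omega) hw
        rw [List.find?_eq_none] at heq
        have h2 := heq y (by rw [List.mem_range]; omega)
        rw [this] at h2
        simp at h2
      rw [hnone]
      simp
    · rw [List.range_eq_range', find?_range'_some_iff] at heq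
      obtain ⟨h0, hs0n, hwf, hmin⟩ := heq
      by_cases hle : s0 ≤ pvM rep fi fs
      · have hsome : (List.range' 0 (pvM rep fi fs + 1)).find? (pvWinb rep fs) = some s0 := by
          rw [find?_range'_some_iff]
          refine ⟨by omega, by omega, ?_, ?_⟩
          · rw [pvWinb_iff]
            exact ((pvWf_iff rep fs s0).mp hwf).2
          · intro y hy0 hy1
            by_contra hb
            have hw : pvWinb rep fs y = true := by simpa using hb
            have := winb_imp_wf rep fi fs hPre hn' y (by omega) hw
            rw [hmin y (by omega) (by omega)] at this
            exact Bool.noConfusion this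
        rw [hsome]
        have hgate : (s0 : Int) ≤ min (max (min (fi - 1) ((rep.length : Int) - fs)) 0) ((rep.length : Int) - 1) := by
          rw [← hKdef]; omega
        simp only [Option.map_some, Option.bind_some]
        simp
        refine ⟨?_, by omega⟩
        have t3 : (s0 : Int) ≤ max (min (fi - 1) ((rep.length : Int) - fs)) 0 :=
          le_trans hgate (min_le_left _ _)
        rcases le_or_gt (min (fi - 1) ((rep.length : Int) - fs)) 0 with hk | hk
        · right
          rw [max_eq_right hk] at t3
          omega
        · rw [max_eq_left (by omega)] at t3
          have u1 := min_le_left (fi - 1) ((rep.length : Int) - fs)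
          have u2 := min_le_right (fi - 1) ((rep.length : Int) - fs)
          exact Or.inl ⟨by omega, by omega⟩
      · have hnone : (List.range' 0 (pvM rep fi fs + 1)).find? (pvWinb rep fs) = none := by
          rw [find?_range'_none_iff]
          intro y hy0 hy1
          by_contra hb
          have hw : pvWinb rep fs y = true := by simpa using hb
          have hwfy := winb_imp_wf rep fi fs hPre hn' y (by omega) hw
          have : y < s0 := by omega
          rw [hmin y (by omega) this] at hwfy
          exact Bool.noConfusion hwfy
        rw [hnone]
        have hgate : ¬ ((s0 : Int) ≤ min (max (min (fi - 1) ((rep.length : Int) - fs)) 0) ((rep.length : Int) - 1)) := by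
          rw [← hKdef]; omega
        simp
        intro h
        exfalso
        apply hgate
        refine le_min ?_ (by omega)
        rcases h with ⟨h1, h2⟩ | h0
        · exact le_trans (le_min (by omega) h2) (le_max_left _ _)
        · have h0' : (s0 : Int) ≤ 0 := by omega
          exact le_trans h0' (le_max_right _ _)
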